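-- pv_equiv track=rewrite | github.com/abdelhadi-essabri/Reinforcement-learning | utils.py | dict_rewards
-- ===== SOURCE A (Python) =====
-- def dict_rewards(K, T, trap):
--     """
--     Renvoie un dictionnaire contenant les récompenses associées à chaque position de la grille.
--
--     Args:
--     - K (int): Dimension de la grille.
--     - T (tuple): Position de la case terminale.
--     - trap (bool): Si True, certains états deviennent des "pièges" avec des récompenses négatives.
--
--     Returns:
--     - rewards (dict): Dictionnaire où chaque clé est une position (i, j) et chaque valeur une récompense.
--     """
--     rewards = {}
--
--     for i in range(1, K+1):
--         for j in range(1, K+1):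
--             if trap and ((1 <= i <= 8 and j == 4) or (5 <= i <= 12 and j == 8)):
--                 rewards[(i, j)] = -2 * (K - 1)
--             elif (i, j) != T:
--                 rewards[(i, j)] = -1
--             else:
--                 rewards[(i, j)] = 2 * (K - 1)
--
--     return rewards
-- ===== SOURCE B (Python) =====
-- def row_values(K, T, trap, i):
--     # Row i as a value array: a constant [-1] template patched at O(1) positions
--     # (terminal first, then trap columns, so traps keep precedence).
--     row = [-1] * K
--     if i == T[0] and 1 <= T[1] <= K:
--         row[T[1] - 1] = 2 * (K - 1)
--     if trap:
--         if i <= 8 and K >= 4: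
--             row[3] = -2 * (K - 1)
--         if 5 <= i <= 12 and K >= 8:
--             row[7] = -2 * (K - 1)
--     return row
--
--
-- def dict_rewards(K, T, trap):
--     rewards = {}
--     for i in range(1, K + 1):
--         row = row_values(K, T, trap, i)
--         for j in range(1, K + 1):
--             rewards[(i, j)] = row[j - 1]
--     return rewards
-- ===== Notes on version B (the rewrite author's own statement) =====
-- stated objective: alternative
-- what changed: Instead of deciding the reward with a three-way conditional evaluated at every cell, B materialises each row as a constant [-1] value array, patches at most three positions of it by index (terminal cell first, then the two trap columns, preserving A's trap-over-terminal precedence), and then emits the row's cells by reading the array.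
import Mathlib
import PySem

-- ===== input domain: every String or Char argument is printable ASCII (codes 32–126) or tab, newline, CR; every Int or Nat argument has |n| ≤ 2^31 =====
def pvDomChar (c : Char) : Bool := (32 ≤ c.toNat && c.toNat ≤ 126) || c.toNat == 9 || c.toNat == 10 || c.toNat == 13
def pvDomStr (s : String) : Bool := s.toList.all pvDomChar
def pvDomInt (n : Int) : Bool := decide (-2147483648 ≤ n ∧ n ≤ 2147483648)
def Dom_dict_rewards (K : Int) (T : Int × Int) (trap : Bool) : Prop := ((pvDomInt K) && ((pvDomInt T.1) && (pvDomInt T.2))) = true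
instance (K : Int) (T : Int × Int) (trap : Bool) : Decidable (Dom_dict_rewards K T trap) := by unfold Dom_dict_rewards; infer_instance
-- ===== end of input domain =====

-- B builds each row as a constant [-1] value array patched at O(1) indices
-- (terminal first, then trap columns) and emits cells by reading the array;
-- alternative decomposition, same asymptotic cost.

-- ===== PORT A =====
def dict_rewards (K : Int) (T : Int × Int) (trap : Bool) : List (Int × Int × Int) :=
  ((PySem.List.pyRange 1 (K + 1) 1).foldl (fun rewards i =>
      (PySem.List.pyRange 1 (K + 1) 1).foldl (fun rewards j =>
        if trap ∧ ((1 ≤ i ∧ i ≤ 8 ∧ j = 4) ∨ (5 ≤ i ∧ i ≤ 12 ∧ j = 8)) then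
          rewards.insert (i, j) (-2 * (K - 1))
        else if (i, j) ≠ T then
          rewards.insert (i, j) (-1)
        else
          rewards.insert (i, j) (2 * (K - 1))) rewards)
    (PySem.Dict.empty : PySem.Dict (Int × Int) Int)).items.map (fun p => (p.1.1, p.1.2, p.2))

-- ===== PORT B =====
-- 'if the guard holds, assign row[n] = v' (each of B's three conditional index assignments;
-- the guard always puts n in range, where PySem.List.pySetD is Python's l[n] = v exactly)
def patch (l : List Int) (c : Prop) [Decidable c] (n : Int) (v : Int) : List Int :=
  if c then PySem.List.pySetD l n v else l

-- row i as Python's row_values builds it: [-1] * K, then the terminal patch, then the two trap patches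
def row_values (K : Int) (T : Int × Int) (trap : Bool) (i : Int) : List Int :=
  patch
    (patch
      (patch (List.replicate K.toNat (-1))
        (i = T.1 ∧ 1 ≤ T.2 ∧ T.2 ≤ K) (T.2 - 1) (2 * (K - 1)))
      (trap ∧ i ≤ 8 ∧ 4 ≤ K) 3 (-2 * (K - 1)))
    (trap ∧ 5 ≤ i ∧ i ≤ 12 ∧ 8 ≤ K) 7 (-2 * (K - 1))

def dict_rewards_alt (K : Int) (T : Int × Int) (trap : Bool) : List (Int × Int × Int) :=
  ((PySem.List.pyRange 1 (K + 1) 1).foldl (fun rewards i =>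
      (PySem.List.pyRange 1 (K + 1) 1).foldl (fun rewards j =>
        rewards.insert (i, j) (PySem.List.pyGetD (row_values K T trap i) (j - 1) 0)) rewards)
    (PySem.Dict.empty : PySem.Dict (Int × Int) Int)).items.map (fun p => (p.1.1, p.1.2, p.2))

-- ===== PRECONDITION & SPEC =====
def Spec_dict_rewards (K : Int) (T : Int × Int) (trap : Bool) (out : List (Int × Int × Int)) : Prop := out = dict_rewards_alt K T trap
instance (K : Int) (T : Int × Int) (trap : Bool) (out : List (Int × Int × Int)) : Decidable (Spec_dict_rewards K T trap out) := by unfold Spec_dict_rewards; infer_instance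

-- ===== CLAIM (what is proved, stated in full; the proofs are below) =====
def Claim_equal_dict_rewards : Prop := ∀ (K : Int) (T : Int × Int) (trap : Bool), Dom_dict_rewards K T trap → Spec_dict_rewards K T trap (dict_rewards K T trap)

-- ===== LEMMAS AND PROOFS =====

lemma length_patch (l : List Int) (c : Prop) [Decidable c] (n v : Int) :
    (patch l c n v).length = l.length := by
  unfold patch; split_ifs with h
  · exact PySem.List.length_pySetD l n v
  · rfl

lemma getD_patch (l : List Int) (c : Prop) [Decidable c] {n m : Int} (v : Int)
    (hn : c → 0 ≤ n ∧ n < (l.length : Int)) (hm0 : 0 ≤ m) (hm : m < (l.length : Int)) :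
    PySem.List.pyGetD (patch l c n v) m 0 = if c ∧ m = n then v else PySem.List.pyGetD l m 0 := by
  unfold patch
  split_ifs with hc he he
  · obtain ⟨hn0, hnl⟩ := hn hc
    obtain ⟨-, rfl⟩ := he
    rw [PySem.List.pySetD_of_nonneg _ _ hn0,
        PySem.List.pyGetD_eq_getElem _ _ hm0 (by simpa using hm)]
    simp
  · obtain ⟨hn0, hnl⟩ := hn hc
    rw [PySem.List.pySetD_of_nonneg _ _ hn0,
        PySem.List.pyGetD_eq_getElem _ _ hm0 (by simpa using hm),
        PySem.List.pyGetD_eq_getElem _ _ hm0 (by omega)]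
    rw [List.getElem_set]
    have hne : n.toNat ≠ m.toNat := by
      intro h; exact he ⟨hc, by omega⟩
    simp [hne]
  · exact absurd he.1 hc
  · rfl

lemma getD_replicate (K m : Int) (h0 : 0 ≤ m) (hm : m < K) :
    PySem.List.pyGetD (List.replicate K.toNat (-1 : Int)) m 0 = -1 := by
  rw [PySem.List.pyGetD_eq_getElem _ _ h0 (by simp; omega)]
  simp

-- reading B's patched row at column j gives exactly the value A's three-way branch assigns
lemma row_values_get (K : Int) (T : Int × Int) (trap : Bool) {i j : Int}
    (hi1 : 1 ≤ i) (hi2 : i ≤ K) (hj1 : 1 ≤ j) (hj2 : j ≤ K) :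
    PySem.List.pyGetD (row_values K T trap i) (j - 1) 0 =
      (if trap ∧ ((1 ≤ i ∧ i ≤ 8 ∧ j = 4) ∨ (5 ≤ i ∧ i ≤ 12 ∧ j = 8)) then -2 * (K - 1)
       else if (i, j) ≠ T then -1 else 2 * (K - 1)) := by
  obtain ⟨t1, t2⟩ := T
  have hK : 1 ≤ K := le_trans hi1 hi2
  unfold row_values
  dsimp only
  have hL0 : ((List.replicate K.toNat (-1 : Int)).length : Int) = K := by simp; omega
  have hL1 : ((patch (List.replicate K.toNat (-1 : Int))
      (i = t1 ∧ 1 ≤ t2 ∧ t2 ≤ K) (t2 - 1) (2 * (K - 1))).length : Int) = K := by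
    rw [length_patch]; exact hL0
  have hL2 : ((patch (patch (List.replicate K.toNat (-1 : Int))
      (i = t1 ∧ 1 ≤ t2 ∧ t2 ≤ K) (t2 - 1) (2 * (K - 1)))
      (trap = true ∧ i ≤ 8 ∧ 4 ≤ K) 3 (-2 * (K - 1))).length : Int) = K := by
    rw [length_patch]; exact hL1
  rw [getD_patch _ _ _
        (fun hc => have h8 : 8 ≤ K := hc.2.2.2; ⟨by omega, by rw [hL2]; omega⟩)
        (by omega) (by rw [hL2]; omega)]
  rw [getD_patch _ _ _
        (fun hc => have h4 : 4 ≤ K := hc.2.2; ⟨by omega, by rw [hL1]; omega⟩)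
        (by omega) (by rw [hL1]; omega)]
  rw [getD_patch _ _ _
        (fun hc => have ht := hc.2; ⟨by omega, by rw [hL0]; omega⟩)
        (by omega) (by rw [hL0]; omega)]
  rw [getD_replicate K (j - 1) (by omega) (by omega)]
  simp only [Prod.mk.injEq, ne_eq]
  cases trap with
  | false =>
      simp only [Bool.false_eq_true, false_and, if_false]
      split_ifs <;> omega
  | true =>
      simp only [true_and]
      split_ifs <;> omega

-- ===== VERDICT (by name: the statement is the Claim_ definition above) =====
theorem dict_rewards_spec : Claim_equal_dict_rewards := by
  intro K T trap _
  unfold Spec_dict_rewards dict_rewards dict_rewards_alt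
  congr 1
  apply congrArg
  apply PySem.List.foldl_congr_mem
  intro d i hi
  rw [PySem.List.mem_pyRange_one] at hi
  apply PySem.List.foldl_congr_mem
  intro d' j hj
  rw [PySem.List.mem_pyRange_one] at hj
  rw [row_values_get K T trap hi.1 (by omega) hj.1 (by omega)]
  split_ifs <;> rfl
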